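-- pv_equiv track=rewrite | github.com/mcw519/kaldi | meng_scripts/hotword/smart_reading.py | check_md_char_illegal
-- ===== SOURCE A (Python) =====
-- def check_md_char_illegal(x, words_table):
--     '''
--     read a 'list' and check each character.
--     Returns:
--         legal result with list format.
--     '''
--     flac = []
--     for j in [a for a in ''.join(x)]:
--         try:
--             words_table[j]
--             flac.append(True)
--         except KeyError:
--             flac.append(False)
--
--     if False in flac:
--         return False
--     else:
--         return True
-- ===== SOURCE B (Python) =====
-- def check_md_char_illegal(x, words_table):
--     """Cardinality argument: adjoining the text's characters to the key set
--     enlarges it iff some character is not already a key."""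
--     keys = set(words_table)
--     return len(keys | set("".join(x))) == len(keys)
-- ===== Notes on version B (the rewrite author's own statement) =====
-- stated objective: alternative
-- what changed: Instead of testing each character's membership (A's per-character try/except boolean list plus a final 'False in' scan), B unions the deduplicated character set into the key set and decides legality by comparing cardinalities: the union has the same size as the key set iff no new character was added.
import Mathlib
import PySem

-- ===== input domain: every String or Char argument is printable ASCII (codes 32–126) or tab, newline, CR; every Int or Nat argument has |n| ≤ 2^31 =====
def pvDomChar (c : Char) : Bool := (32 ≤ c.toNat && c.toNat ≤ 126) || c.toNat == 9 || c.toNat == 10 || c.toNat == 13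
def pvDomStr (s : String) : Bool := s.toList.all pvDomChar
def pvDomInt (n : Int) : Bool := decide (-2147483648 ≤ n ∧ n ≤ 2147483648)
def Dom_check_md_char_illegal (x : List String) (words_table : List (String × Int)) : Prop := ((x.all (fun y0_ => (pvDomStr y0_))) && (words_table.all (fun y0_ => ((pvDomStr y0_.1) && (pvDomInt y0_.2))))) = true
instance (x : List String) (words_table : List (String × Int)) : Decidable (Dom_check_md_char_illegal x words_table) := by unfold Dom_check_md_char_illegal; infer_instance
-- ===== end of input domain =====

-- B decides legality by a cardinality comparison — union the text's character set into the key set and check the size did not grow — instead of A's per-character try/except boolean list plus a final 'False in' scan (alternative decomposition, same cost).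


-- ===== PORT A =====
-- literal port of A: accumulate a Bool per character (try words_table[j]), then 'False in flac'
def check_md_char_illegal (x : List String) (words_table : List (String × Int)) : Bool :=
  let flac : List Bool :=
    (PySem.Str.join "" x).toList.foldl
      (fun acc j =>
        match (PySem.Dict.mk words_table).get? (String.ofList [j]) with
        | some _ => acc ++ [true]
        | none => acc ++ [false]) []
  if false ∈ flac then false else true

-- ===== PORT B =====
-- port of B: keys = set(words_table); len(keys | set("".join(x))) == len(keys)  (Python chars are 1-char strings)
def check_md_char_illegal_alt (x : List String) (words_table : List (String × Int)) : Bool :=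
  let keys := PySem.Set.ofList (PySem.Dict.mk words_table).keys
  PySem.Set.len
      (PySem.Set.union keys
        (PySem.Set.ofList ((PySem.Str.join "" x).toList.map (fun c => String.ofList [c]))))
    == PySem.Set.len keys

-- ===== PRECONDITION & SPEC =====
def Spec_check_md_char_illegal (x : List String) (words_table : List (String × Int)) (out : Bool) : Prop := out = check_md_char_illegal_alt x words_table
instance (x : List String) (words_table : List (String × Int)) (out : Bool) : Decidable (Spec_check_md_char_illegal x words_table out) := by unfold Spec_check_md_char_illegal; infer_instance

-- ===== CLAIM (what is proved, stated in full; the proofs are below) =====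
def Claim_equal_check_md_char_illegal : Prop := ∀ (x : List String) (words_table : List (String × Int)), Dom_check_md_char_illegal x words_table → Spec_check_md_char_illegal x words_table (check_md_char_illegal x words_table)

-- ===== LEMMAS AND PROOFS =====

-- B's cardinality test equals the subset condition: the union's size stays len(keys) iff every listed element is already a key.
lemma len_union_eq_iff (keys : PySem.Set String) (T : List String) :
    ((PySem.Set.len (PySem.Set.union keys (PySem.Set.ofList T)) == PySem.Set.len keys) = true)
      ↔ ∀ y ∈ T, y ∈ keys := by
  unfold PySem.Set.union PySem.Set.len
  rw [PySem.Set.update_eq_append_filter]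
  simp only [List.length_append, beq_iff_eq]
  constructor
  · intro h y hy
    have hf : (List.filter (fun z => !keys.contains z)
        (PySem.Set.ofList (PySem.Set.ofList T))) = [] := by
      have : (List.filter (fun z => !keys.contains z)
          (PySem.Set.ofList (PySem.Set.ofList T))).length = 0 := by omega
      exact List.length_eq_zero_iff.mp this
    have := List.filter_eq_nil_iff.mp hf y
      (by rw [PySem.Set.mem_ofList, PySem.Set.mem_ofList]; exact hy)
    simpa [PySem.Set.contains_iff] using this
  · intro h
    have hf : (List.filter (fun z => !keys.contains z)
        (PySem.Set.ofList (PySem.Set.ofList T))) = [] := by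
      apply List.filter_eq_nil_iff.mpr
      intro y hy
      rw [PySem.Set.mem_ofList, PySem.Set.mem_ofList] at hy
      simpa [PySem.Set.contains_iff] using h y hy
    rw [hf]; simp

lemma ports_agree (x : List String) (words_table : List (String × Int)) :
    check_md_char_illegal x words_table = check_md_char_illegal_alt x words_table := by
  unfold check_md_char_illegal check_md_char_illegal_alt
  rw [show (fun (acc : List Bool) (j : Char) =>
        match (PySem.Dict.mk words_table).get? (String.ofList [j]) with
        | some _ => acc ++ [true]
        | none => acc ++ [false])
      = (fun acc j => acc ++ [((PySem.Dict.mk words_table).get? (String.ofList [j])).isSome])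
      from funext fun acc => funext fun j => by
        cases h : (PySem.Dict.mk words_table).get? (String.ofList [j]) <;> simp]
  rw [PySem.List.foldl_append_singleton_eq_map]
  by_cases hall : ∀ c ∈ (PySem.Str.join "" x).toList,
      String.ofList [c] ∈ (PySem.Dict.mk words_table).keys
  · rw [if_neg, Eq.comm]
    · rw [len_union_eq_iff]
      intro y hy
      obtain ⟨c, hc, rfl⟩ := List.mem_map.mp hy
      rw [PySem.Set.mem_ofList]
      exact hall c hc
    · intro hmem
      obtain ⟨c, hc, hf⟩ := List.mem_map.mp hmem
      have h1 := hall c hc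
      rw [← PySem.Dict.contains_iff_mem_keys, PySem.Dict.contains_eq_isSome_get?] at h1
      rw [h1] at hf
      exact Bool.noConfusion hf
  · push Not at hall
    obtain ⟨c, hc, hnk⟩ := hall
    rw [if_pos, Eq.comm]
    · rw [Bool.eq_false_iff]
      intro hB
      exact absurd (by
          have := (len_union_eq_iff _ _).mp hB
              (String.ofList [c]) (List.mem_map.mpr ⟨c, hc, rfl⟩)
          rwa [PySem.Set.mem_ofList] at this)
        hnk
    · refine List.mem_map.mpr ⟨c, hc, ?_⟩
      rw [← PySem.Dict.contains_eq_isSome_get?, ← Bool.not_eq_true,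
        PySem.Dict.contains_iff_mem_keys]
      exact hnk

-- ===== VERDICT (by name: the statement is the Claim_ definition above) =====
theorem check_md_char_illegal_spec : Claim_equal_check_md_char_illegal := by
  intro x wt _
  unfold Spec_check_md_char_illegal
  exact ports_agree x wt
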